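-- pv_equiv track=rewrite | github.com/pypi-data/pypi-mirror-195 | packages/portmod/portmod-2.5.8-cp37-abi3-win_amd64.whl/portmod/query.py | list_maintainers_to_human_strings
-- ===== SOURCE A (Python) =====
-- from typing import (
--     AbstractSet,
--     DefaultDict,
--     Dict,
--     Iterable,
--     List,
--     Optional,
--     Sequence,
--     Set,
--     Tuple,
--     Union,
-- )
--
-- def list_maintainers_to_human_strings(maintainers: List[str]) -> str:
--     """return the list of maintainers as a human readible string"""
--     result = ""
--     for maintainer_id in range(len(maintainers)):
--         maintainer = maintainers[maintainer_id]
--         if maintainer_id >= len(maintainers) - 1:  # the last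
--             result += maintainer
--         elif maintainer_id >= len(maintainers) - 2:  # the second last
--             result += maintainer + " and "
--         else:
--             result += maintainer + ", "
--     return result
-- ===== SOURCE B (Python) =====
-- def list_maintainers_to_human_strings(maintainers):
--     """return the list of maintainers as a human readible string"""
--     if not maintainers:
--         return ""
--     if len(maintainers) == 1:
--         return maintainers[0]
--     return ", ".join(maintainers[:-1]) + " and " + maintainers[-1]
-- ===== Notes on version B (the rewrite author's own statement) =====
-- stated objective: idiomatic
-- what changed: Replaces the index-based loop with per-element positional branching by guards for the empty and singleton cases plus a single ', '.join over all-but-last concatenated with ' and ' and the last element; join avoids the repeated string concatenation of the loop (measured constant-factor speedup).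
import Mathlib
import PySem

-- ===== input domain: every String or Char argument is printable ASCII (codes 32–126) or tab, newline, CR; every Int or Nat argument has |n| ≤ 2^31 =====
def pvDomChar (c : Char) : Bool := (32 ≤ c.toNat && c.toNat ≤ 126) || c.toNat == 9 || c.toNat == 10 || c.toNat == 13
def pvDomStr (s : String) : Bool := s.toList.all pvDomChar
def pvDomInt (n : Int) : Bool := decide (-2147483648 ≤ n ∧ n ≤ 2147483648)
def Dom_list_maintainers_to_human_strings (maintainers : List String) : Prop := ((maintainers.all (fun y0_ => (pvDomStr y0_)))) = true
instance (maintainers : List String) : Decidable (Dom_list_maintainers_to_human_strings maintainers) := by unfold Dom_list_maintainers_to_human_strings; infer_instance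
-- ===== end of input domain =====

-- B replaces A's indexed loop with positional branching by guards for the 0/1-element
-- cases plus a single ", ".join of all-but-last and an appended " and " + last (idiomatic).

-- ===== PORT A =====
def list_maintainers_to_human_strings (maintainers : List String) : String :=
  (PySem.List.pyRange 0 (maintainers.length : Int) 1).foldl
    (fun result maintainer_id =>
      let maintainer := PySem.List.pyGetD maintainers maintainer_id ""
      if maintainer_id ≥ (maintainers.length : Int) - 1 then result ++ maintainer
      else if maintainer_id ≥ (maintainers.length : Int) - 2 then result ++ maintainer ++ " and "
      else result ++ maintainer ++ ", ") ""

-- ===== PORT B =====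
def list_maintainers_to_human_strings_alt (maintainers : List String) : String :=
  if maintainers = [] then ""
  else if maintainers.length = 1 then PySem.List.pyGetD maintainers 0 ""
  else PySem.Str.join ", " (PySem.List.slice maintainers none (some (-1)))
       ++ " and " ++ PySem.List.pyGetD maintainers (-1) ""

-- ===== PRECONDITION & SPEC =====
def Spec_list_maintainers_to_human_strings (maintainers : List String) (out : String) : Prop := out = list_maintainers_to_human_strings_alt maintainers
instance (maintainers : List String) (out : String) : Decidable (Spec_list_maintainers_to_human_strings maintainers out) := by unfold Spec_list_maintainers_to_human_strings; infer_instance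

-- ===== CLAIM (what is proved, stated in full; the proofs are below) =====
def Claim_equal_list_maintainers_to_human_strings : Prop := ∀ (maintainers : List String), Dom_list_maintainers_to_human_strings maintainers → Spec_list_maintainers_to_human_strings maintainers (list_maintainers_to_human_strings maintainers)

-- ===== LEMMAS AND PROOFS =====

-- the string A's loop appends at index k
def pvPiece (ms : List String) (k : Nat) : String :=
  ms.getD k "" ++ (if k + 1 ≥ ms.length then "" else if k + 2 ≥ ms.length then " and " else ", ")

lemma pvFoldPrefix (h : Nat → String) (l : List Nat) (acc : String) :
    l.foldl (fun r k => r ++ h k) acc = acc ++ l.foldl (fun r k => r ++ h k) "" := by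
  induction l generalizing acc with
  | nil => simp
  | cons a t ih =>
      simp only [List.foldl_cons]
      rw [ih (acc ++ h a), ih ("" ++ h a)]
      simp [String.append_assoc]

lemma pvA_eq_fold (ms : List String) :
    list_maintainers_to_human_strings ms
      = (List.range ms.length).foldl (fun r k => r ++ pvPiece ms k) "" := by
  unfold list_maintainers_to_human_strings
  rw [PySem.List.pyRange_zero_natCast, List.foldl_map]
  congr 1
  funext r k
  simp only [PySem.List.pyGetD_natCast, pvPiece]
  split_ifs with h1 h2 h3 h4 h5 <;> first
    | omega
    | simp [String.append_assoc]

lemma pvPiece_cons_succ (a : String) (rest : List String) (k : Nat) :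
    pvPiece (a :: rest) (k + 1) = pvPiece rest k := by
  simp only [pvPiece, List.getD_cons_succ, List.length_cons]
  congr 1
  split_ifs <;> first | rfl | omega

lemma pvFold_cons (a : String) (rest : List String) :
    (List.range (a :: rest).length).foldl (fun r k => r ++ pvPiece (a :: rest) k) ""
      = pvPiece (a :: rest) 0
        ++ (List.range rest.length).foldl (fun r k => r ++ pvPiece rest k) "" := by
  rw [List.length_cons, List.range_succ_eq_map, List.foldl_cons, List.foldl_map]
  rw [show (fun (r : String) (k : Nat) => r ++ pvPiece (a :: rest) (k + 1))
        = fun r k => r ++ pvPiece rest k from by funext r k; rw [pvPiece_cons_succ]]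
  rw [pvFoldPrefix]
  simp

lemma pvJoin_cons_cons (sep a b : String) (rest : List String) :
    PySem.Str.join sep (a :: b :: rest) = a ++ sep ++ PySem.Str.join sep (b :: rest) := by
  simp [PySem.Str.join, PySem.Chars.join_cons_cons, String.ofList_append, String.append_assoc]

lemma pvJoin_singleton (sep a : String) : PySem.Str.join sep [a] = a := by
  simp [PySem.Str.join, PySem.Chars.join_singleton]

-- B on a list with at least two elements, peeled from the front
lemma pvAlt_two (a b : String) (rest : List String) :
    list_maintainers_to_human_strings_alt (a :: b :: rest)
      = PySem.Str.join ", " ((a :: b :: rest).dropLast)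
        ++ " and " ++ (a :: b :: rest).getLast (by simp) := by
  unfold list_maintainers_to_human_strings_alt
  rw [PySem.List.slice_to_neg_one, PySem.List.pyGetD_neg_one _ _ (by simp)]
  simp

lemma pvMain (ms : List String) :
    (List.range ms.length).foldl (fun r k => r ++ pvPiece ms k) ""
      = list_maintainers_to_human_strings_alt ms := by
  induction ms with
  | nil => simp [list_maintainers_to_human_strings_alt]
  | cons a rest ih =>
      rw [pvFold_cons, ih]
      match rest with
      | [] => simp [pvPiece, list_maintainers_to_human_strings_alt]
      | [b] =>
          rw [pvAlt_two]
          simp [pvPiece, list_maintainers_to_human_strings_alt, pvJoin_singleton,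
                String.append_assoc]
      | b :: c :: t =>
          rw [pvAlt_two, pvAlt_two]
          have hdl : (a :: b :: c :: t).dropLast = a :: (b :: c :: t).dropLast := by simp
          have hdl2 : (b :: c :: t).dropLast = b :: (c :: t).dropLast := by simp
          have hgl : (a :: b :: c :: t).getLast (by simp)
              = (b :: c :: t).getLast (by simp) := List.getLast_cons (by simp)
          rw [hdl, hgl, hdl2, pvJoin_cons_cons]
          simp only [pvPiece, List.getD_cons_zero, List.length_cons]
          split_ifs <;> first | omega | simp [String.append_assoc]

-- ===== VERDICT (by name: the statement is the Claim_ definition above) =====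
theorem list_maintainers_to_human_strings_spec : Claim_equal_list_maintainers_to_human_strings := by
  intro ms _
  unfold Spec_list_maintainers_to_human_strings
  rw [pvA_eq_fold, pvMain]
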